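-- pv_equiv track=rewrite | github.com/Mish2000/fingerprint-research | apps/api/benchmark_meta.py | default_split_for_view
-- ===== SOURCE A (Python) =====
-- from typing import Any, Dict, Mapping, Optional
--
-- SPLIT_ORDER = {"val": 0, "test": 1, "train": 2}
--
-- def default_split_for_view(available_splits: list[str], view_mode: str) -> Optional[str]:
--     if not available_splits:
--         return None
--     preferred = ["test", "val"] if view_mode != "smoke" else ["val", "test"]
--     for key in preferred:
--         if key in available_splits:
--             return key
--     return sorted(available_splits, key=lambda split: SPLIT_ORDER.get(split, 99))[0]
-- ===== SOURCE B (Python) =====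
-- from typing import Optional
--
-- def default_split_for_view(available_splits: list[str], view_mode: str) -> Optional[str]:
--     if not available_splits:
--         return None
--     priority = ["val", "test", "train"] if view_mode == "smoke" else ["test", "val", "train"]
--     def rank(split: str) -> int:
--         return priority.index(split) if split in priority else 99
--     return min(available_splits, key=rank)
-- ===== Notes on version B (the rewrite author's own statement) =====
-- stated objective: simpler
-- what changed: Replaced A's two-phase selection (membership loop over a preferred pair, then a stable sort of the whole list as fallback) by a single ranking pass: one per-view-mode priority list and min(available_splits, key=rank).
import Mathlib
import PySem

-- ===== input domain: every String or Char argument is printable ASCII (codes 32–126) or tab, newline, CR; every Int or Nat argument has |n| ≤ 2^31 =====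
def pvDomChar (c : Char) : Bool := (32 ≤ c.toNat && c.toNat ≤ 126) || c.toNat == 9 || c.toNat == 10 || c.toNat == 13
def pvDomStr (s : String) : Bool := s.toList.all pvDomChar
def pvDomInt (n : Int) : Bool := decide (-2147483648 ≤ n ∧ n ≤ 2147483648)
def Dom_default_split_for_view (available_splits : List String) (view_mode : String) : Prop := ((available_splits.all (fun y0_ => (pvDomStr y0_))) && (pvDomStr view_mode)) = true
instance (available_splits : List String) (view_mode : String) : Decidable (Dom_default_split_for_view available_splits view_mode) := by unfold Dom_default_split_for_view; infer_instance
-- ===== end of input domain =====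

-- B replaces A's two-phase selection (preferred-pair membership loop, then sorted fallback)
-- by a single ranking pass: min over the list under a per-view-mode priority rank (objective: simpler).


-- ===== PORT A =====
-- SPLIT_ORDER = {"val": 0, "test": 1, "train": 2}
def pvSplitOrder : PySem.Dict String Int :=
  PySem.Dict.ofList [("val", 0), ("test", 1), ("train", 2)]

def default_split_for_view (available_splits : List String) (view_mode : String) : Option String :=
  if available_splits = [] then none
  else
    let preferred := if view_mode ≠ "smoke" then ["test", "val"] else ["val", "test"]
    match preferred.find? (fun key => available_splits.contains key) with
    | some key => some key
    | none =>
      PySem.List.pyGet?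
        (PySem.List.sorted available_splits (fun split => PySem.Dict.getD pvSplitOrder split 99) false) 0

-- ===== PORT B =====
def pvRank (priority : List String) (split : String) : Int :=
  match PySem.List.index? priority split with
  | some i => (i : Int)
  | none => 99

def default_split_for_view_alt (available_splits : List String) (view_mode : String) : Option String :=
  if available_splits = [] then none
  else
    let priority := if view_mode = "smoke" then ["val", "test", "train"] else ["test", "val", "train"]
    PySem.List.min? available_splits (pvRank priority)

-- ===== PRECONDITION & SPEC =====
def Spec_default_split_for_view (available_splits : List String) (view_mode : String) (out : Option String) : Prop := out = default_split_for_view_alt available_splits view_mode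
instance (available_splits : List String) (view_mode : String) (out : Option String) : Decidable (Spec_default_split_for_view available_splits view_mode out) := by unfold Spec_default_split_for_view; infer_instance

-- ===== CLAIM (what is proved, stated in full; the proofs are below) =====
def Claim_equal_default_split_for_view : Prop := ∀ (available_splits : List String) (view_mode : String), Dom_default_split_for_view available_splits view_mode → Spec_default_split_for_view available_splits view_mode (default_split_for_view available_splits view_mode)

-- ===== LEMMAS AND PROOFS =====

-- rank of a 3-element priority list, case by case
theorem pvRank_eq (a b c y : String) (hab : a ≠ b) (hac : a ≠ c) (hbc : b ≠ c) :
    pvRank [a, b, c] y =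
      if y = a then 0 else if y = b then 1 else if y = c then 2 else 99 := by
  by_cases h1 : y = a
  · subst h1
    unfold pvRank
    rw [PySem.List.index?_cons_self]
    simp
  · by_cases h2 : y = b
    · subst h2
      unfold pvRank
      rw [PySem.List.index?_cons_of_ne _ (Ne.symm h1), PySem.List.index?_cons_self]
      simp [h1]
    · by_cases h3 : y = c
      · subst h3
        unfold pvRank
        rw [PySem.List.index?_cons_of_ne _ (Ne.symm h1), PySem.List.index?_cons_of_ne _ (Ne.symm h2),
          PySem.List.index?_cons_self]
        simp [h1, h2]
      · have hnone : PySem.List.index? [a, b, c] y = none :=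
          (PySem.List.index?_eq_none_iff _ _).mpr (by simp [h1, h2, h3])
        unfold pvRank
        rw [hnone]
        simp [h1, h2, h3]

theorem pvRank_nonneg (p : List String) (y : String) : 0 ≤ pvRank p y := by
  unfold pvRank
  cases PySem.List.index? p y <;> simp

-- SPLIT_ORDER.get(y, 99), case by case
theorem getD_splitOrder (y : String) :
    PySem.Dict.getD pvSplitOrder y 99 =
      if y = "val" then 0 else if y = "test" then 1 else if y = "train" then 2 else 99 := by
  rw [show pvSplitOrder = PySem.Dict.mk [("val", (0:Int)), ("test", 1), ("train", 2)] from rfl]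
  simp only [PySem.Dict.getD, PySem.Dict.get?, List.find?]
  by_cases h1 : y = "val"
  · simp [h1]
  · by_cases h2 : y = "test"
    · simp [h2]
    · by_cases h3 : y = "train"
      · simp [h3]
      · have e1 : ("val" == y) = false := beq_eq_false_iff_ne.mpr (fun h => h1 h.symm)
        have e2 : ("test" == y) = false := beq_eq_false_iff_ne.mpr (fun h => h2 h.symm)
        have e3 : ("train" == y) = false := beq_eq_false_iff_ne.mpr (fun h => h3 h.symm)
        simp [e1, e2, e3, h1, h2, h3]

-- min? with a key whose minimum is attained at a UNIQUE candidate returns that candidate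
theorem min?_eq_of_unique {α : Type} (xs : List α) (key : α → Int) (m : α)
    (hm : m ∈ xs) (hmin : ∀ y ∈ xs, key m ≤ key y)
    (huniq : ∀ y ∈ xs, key y = key m → y = m) :
    PySem.List.min? xs key = some m := by
  obtain ⟨z, hz⟩ : ∃ z, PySem.List.min? xs key = some z := by
    cases h : PySem.List.min? xs key with
    | none => rw [(PySem.List.min?_eq_none_iff xs key).mp h] at hm; cases hm
    | some z => exact ⟨z, rfl⟩
  have hzmem := PySem.List.min?_mem hz
  have h1 : key z ≤ key m := PySem.List.min?_isMin hz m hm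
  have h2 : key m ≤ key z := hmin z hzmem
  rw [hz, huniq z hzmem (le_antisymm h1 h2)]

-- the min?-fold only looks at the keys of the elements it visits (and of the accumulator)
theorem minstep_foldl_congr {α : Type} (k1 k2 : α → Int) :
    ∀ (xs : List α) (acc : Option α), (∀ y ∈ xs, k1 y = k2 y) →
      (∀ m, acc = some m → k1 m = k2 m) →
      List.foldl (fun acc x => match acc with
        | none => some x
        | some m => if k1 x < k1 m then some x else some m) acc xs =
      List.foldl (fun acc x => match acc with
        | none => some x
        | some m => if k2 x < k2 m then some x else some m) acc xs := by
  intro xs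
  induction xs with
  | nil => intro acc _ _; rfl
  | cons x t ih =>
    intro acc hmem hacc
    have hx : k1 x = k2 x := hmem x List.mem_cons_self
    have hmem' : ∀ y ∈ t, k1 y = k2 y := fun y hy => hmem y (List.mem_cons_of_mem _ hy)
    simp only [List.foldl_cons]
    cases acc with
    | none => exact ih (some x) hmem' (fun m hm => by cases hm; exact hx)
    | some m =>
      have hmk : k1 m = k2 m := hacc m rfl
      have e1 : (match some m with
          | none => some x
          | some m => if k1 x < k1 m then some x else some m) =
          if k1 x < k1 m then some x else some m := rfl
      have e2 : (match some m with
          | none => some x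
          | some m => if k2 x < k2 m then some x else some m) =
          if k2 x < k2 m then some x else some m := rfl
      rw [e1, e2]
      by_cases hc : k1 x < k1 m
      · rw [if_pos hc, if_pos (hmk ▸ hx ▸ hc)]
        exact ih (some x) hmem' (fun m' hm' => by cases hm'; exact hx)
      · rw [if_neg hc, if_neg (hmk ▸ hx ▸ hc)]
        exact ih (some m) hmem' (fun m' hm' => by cases hm'; exact hmk)

theorem min?_congr_key {α : Type} (xs : List α) (k1 k2 : α → Int)
    (h : ∀ y ∈ xs, k1 y = k2 y) :
    PySem.List.min? xs k1 = PySem.List.min? xs k2 := by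
  unfold PySem.List.min?
  exact minstep_foldl_congr k1 k2 xs none h (fun m hm => by cases hm)

-- head of insertBy (ordering by key) is the min-combining step
theorem head?_insertBy {α : Type} (key : α → Int) (x : α) (acc : List α) :
    (PySem.List.insertBy (fun a b => decide (key a < key b)) x acc).head? =
      (match acc.head? with
        | none => some x
        | some m => if key x < key m then some x else some m) := by
  cases acc with
  | nil => rfl
  | cons y t =>
    simp only [PySem.List.insertBy, List.head?_cons]
    by_cases h : key x < key y <;> simp [h]

-- head of the stable sort = Python's min with the same key
theorem head?_sorted_eq_min? {α : Type} (xs : List α) (key : α → Int) :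
    (PySem.List.sorted xs key false).head? = PySem.List.min? xs key := by
  rw [PySem.List.sorted_eq_foldl_insertBy]
  unfold PySem.List.min?
  suffices h : ∀ acc : List α,
      (List.foldl (fun acc x => PySem.List.insertBy (fun a b => decide (key a < key b)) x acc) acc xs).head? =
      List.foldl (fun acc x => match acc with
        | none => some x
        | some m => if key x < key m then some x else some m) acc.head? xs by
    exact h []
  induction xs with
  | nil => intro acc; rfl
  | cons x t ih =>
    intro acc
    simp only [List.foldl_cons]
    rw [ih, head?_insertBy]

-- one view-mode branch of each port: A's preferred-then-sorted pass equals B's min-by-rank pass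
theorem branch_eq (xs : List String) (p1 p2 : String)
    (hp12 : p1 ≠ p2) (hp1t : p1 ≠ "train") (hp2t : p2 ≠ "train")
    (hxs : xs ≠ [])
    (hg : ∀ y ∈ xs, y ≠ p1 → y ≠ p2 →
      PySem.Dict.getD pvSplitOrder y 99 = pvRank [p1, p2, "train"] y) :
    (match [p1, p2].find? (fun key => xs.contains key) with
      | some key => some key
      | none =>
        PySem.List.pyGet?
          (PySem.List.sorted xs (fun split => PySem.Dict.getD pvSplitOrder split 99) false) 0) =
    PySem.List.min? xs (pvRank [p1, p2, "train"]) := by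
  have hr : ∀ y, pvRank [p1, p2, "train"] y =
      if y = p1 then 0 else if y = p2 then 1 else if y = "train" then 2 else 99 :=
    fun y => pvRank_eq p1 p2 "train" y hp12 hp1t hp2t
  by_cases h1 : p1 ∈ xs
  · rw [List.find?_cons_of_pos (by simpa using h1)]
    refine (min?_eq_of_unique xs _ p1 h1 ?_ ?_).symm
    · intro y hy; rw [hr p1, if_pos rfl]; exact pvRank_nonneg _ y
    · intro y hy hkey
      rw [hr p1, if_pos rfl, hr y] at hkey
      by_cases e1 : y = p1
      · exact e1
      · rw [if_neg e1] at hkey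
        by_cases e2 : y = p2 <;> by_cases e3 : y = "train" <;> simp_all
  · rw [List.find?_cons_of_neg (by simpa using h1)]
    by_cases h2 : p2 ∈ xs
    · rw [List.find?_cons_of_pos (by simpa using h2)]
      refine (min?_eq_of_unique xs _ p2 h2 ?_ ?_).symm
      · intro y hy
        rw [hr p2, if_neg (Ne.symm hp12), if_pos rfl, hr y]
        by_cases e1 : y = p1
        · exact absurd (e1 ▸ hy) h1
        · rw [if_neg e1]
          by_cases e2 : y = p2 <;> by_cases e3 : y = "train" <;> simp_all
      · intro y hy hkey
        rw [hr p2, if_neg (Ne.symm hp12), if_pos rfl, hr y] at hkey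
        by_cases e1 : y = p1
        · exact absurd (e1 ▸ hy) h1
        · rw [if_neg e1] at hkey
          by_cases e2 : y = p2 <;> by_cases e3 : y = "train" <;> simp_all
    · rw [List.find?_cons_of_neg (by simpa using h2), List.find?_nil]
      have hne : PySem.List.sorted xs (fun split => PySem.Dict.getD pvSplitOrder split 99) false ≠ [] :=
        fun h => hxs ((PySem.List.sorted_eq_nil_iff xs _ false).mp h)
      have hlen : 0 < (PySem.List.sorted xs (fun split => PySem.Dict.getD pvSplitOrder split 99) false).length :=
        List.length_pos_of_ne_nil hne
      have hget : PySem.List.pyGet?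
          (PySem.List.sorted xs (fun split => PySem.Dict.getD pvSplitOrder split 99) false) 0 =
          (PySem.List.sorted xs (fun split => PySem.Dict.getD pvSplitOrder split 99) false).head? := by
        have hx0 : 0 < xs.length := List.length_pos_of_ne_nil hxs
        simp [PySem.List.pyGet?, PySem.List.pyIdx?, hx0, List.head?_eq_getElem?]
      rw [hget, head?_sorted_eq_min?]
      exact min?_congr_key xs _ _ (fun y hy =>
        hg y hy (fun e => h1 (e ▸ hy)) (fun e => h2 (e ▸ hy)))

-- ===== VERDICT (by name: the statement is the Claim_ definition above) =====
theorem default_split_for_view_spec : Claim_equal_default_split_for_view := by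
  intro xs vm _
  unfold Spec_default_split_for_view default_split_for_view default_split_for_view_alt
  by_cases hnil : xs = []
  · simp [hnil]
  · rw [if_neg hnil, if_neg hnil]
    by_cases hsm : vm = "smoke"
    · rw [if_pos hsm, if_neg (by simp [hsm])]
      refine branch_eq xs "val" "test" (by decide) (by decide) (by decide) hnil ?_
      intro y hy hy1 hy2
      rw [getD_splitOrder, pvRank_eq "val" "test" "train" y (by decide) (by decide) (by decide)]
    · rw [if_neg hsm, if_pos (by simp [hsm])]
      refine branch_eq xs "test" "val" (by decide) (by decide) (by decide) hnil ?_
      intro y hy hy1 hy2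
      rw [getD_splitOrder, pvRank_eq "test" "val" "train" y (by decide) (by decide) (by decide)]
      simp [hy1, hy2]
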